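-- pv_equiv track=rewrite | github.com/pegasus-isi/seismology-workflow | bin/pytutil.py | yd2seconds
-- ===== SOURCE A (Python) =====
-- def is_leap_year(year):
-- 	isleap = 0
-- 	i0 = year % 4
-- 	i1 = year % 100
-- 	i2 = year % 400
-- 	if ((i0 == 0 and i1 != 0) or i2 == 0):
-- 	  isleap = 1
-- 	#
-- 	return(isleap)
--
-- def ndaysinyear(year):
-- 	if (is_leap_year(year) == 1):
-- 	  return(366)
-- 	return(365)
--
-- def yd2seconds(y,d):
-- 	ok = 1
-- 	y0 = 1970
-- 	y1 = y - y0
-- 	ndays = 0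
-- 	for iy in range(y0,y):
-- 		ndays = ndays + ndaysinyear(iy)
-- 	ndays = ndays + d
-- 	nseconds = ndays * 24 * 60 * 60
-- 	return([nseconds, ok])
-- ===== SOURCE B (Python) =====
-- def yd2seconds(y, d):
--     ok = 1
--     yy = y if y > 1970 else 1970
--     # leap years in [1970, yy): closed-form count of leap years up to yy-1, minus the 477 up to 1969
--     leaps = (yy - 1) // 4 - (yy - 1) // 100 + (yy - 1) // 400 - 477
--     ndays = 365 * (yy - 1970) + leaps + d
--     return [ndays * 86400, ok]
-- ===== Notes on version B (the rewrite author's own statement) =====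
-- stated objective: faster
-- what changed: Replaces the per-year loop summing ndaysinyear with a closed-form day count: 365*(years since 1970) plus a floor-division leap-year count.
import Mathlib
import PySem

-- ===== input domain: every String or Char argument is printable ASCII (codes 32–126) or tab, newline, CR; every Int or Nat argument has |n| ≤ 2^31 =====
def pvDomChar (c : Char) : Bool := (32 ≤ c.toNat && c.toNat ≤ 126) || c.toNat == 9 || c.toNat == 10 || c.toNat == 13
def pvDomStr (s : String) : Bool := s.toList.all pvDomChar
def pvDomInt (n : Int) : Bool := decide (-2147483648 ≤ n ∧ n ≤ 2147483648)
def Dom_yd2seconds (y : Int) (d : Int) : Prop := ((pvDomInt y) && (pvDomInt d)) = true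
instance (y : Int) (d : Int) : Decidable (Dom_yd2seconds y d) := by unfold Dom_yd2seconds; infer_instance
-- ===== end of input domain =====

-- B replaces A's per-year loop with a closed-form floor-division leap-year count (faster: O(1) vs O(y-1970)).

-- ===== PORT A =====
def pvIsLeapYear (year : Int) : Int :=
  let isleap : Int := 0
  let i0 := PySem.Int.mod year 4
  let i1 := PySem.Int.mod year 100
  let i2 := PySem.Int.mod year 400
  if (i0 == 0 && i1 != 0) || i2 == 0 then 1 else isleap

def pvNdaysInYear (year : Int) : Int :=
  if pvIsLeapYear year == 1 then 366 else 365

def yd2seconds (y : Int) (d : Int) : List Int :=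
  let ok : Int := 1
  let y0 : Int := 1970
  let _y1 := y - y0
  let ndays : Int := (PySem.List.pyRange y0 y 1).foldl (fun acc iy => acc + pvNdaysInYear iy) 0
  let ndays := ndays + d
  let nseconds := ndays * 24 * 60 * 60
  [nseconds, ok]

-- ===== PORT B =====
def yd2seconds_alt (y : Int) (d : Int) : List Int :=
  let ok : Int := 1
  let yy : Int := if y > 1970 then y else 1970
  let leaps : Int := PySem.Int.floordiv (yy - 1) 4 - PySem.Int.floordiv (yy - 1) 100 + PySem.Int.floordiv (yy - 1) 400 - 477
  let ndays : Int := 365 * (yy - 1970) + leaps + d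
  [ndays * 86400, ok]

-- ===== PRECONDITION & SPEC =====
def Spec_yd2seconds (y : Int) (d : Int) (out : List Int) : Prop := out = yd2seconds_alt y d
instance (y : Int) (d : Int) (out : List Int) : Decidable (Spec_yd2seconds y d out) := by unfold Spec_yd2seconds; infer_instance

-- ===== CLAIM (what is proved, stated in full; the proofs are below) =====
def Claim_equal_yd2seconds : Prop := ∀ (y : Int) (d : Int), Dom_yd2seconds y d → Spec_yd2seconds y d (yd2seconds y d)

-- ===== LEMMAS AND PROOFS =====

-- number of leap years in [1, k] by the closed form (also the analytic continuation used by B)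
def pvL (k : Int) : Int := PySem.Int.floordiv k 4 - PySem.Int.floordiv k 100 + PySem.Int.floordiv k 400

-- one year's length equals 365 plus the increment of the closed-form leap count
theorem pvNdays_eq_L (k : Int) : pvNdaysInYear k = 365 + (pvL k - pvL (k - 1)) := by
  simp only [pvNdaysInYear, pvIsLeapYear, pvL,
    PySem.Int.mod_eq_emod_of_pos (a := k) (b := 4) (by norm_num),
    PySem.Int.mod_eq_emod_of_pos (a := k) (b := 100) (by norm_num),
    PySem.Int.mod_eq_emod_of_pos (a := k) (b := 400) (by norm_num),
    PySem.Int.floordiv_eq_ediv_of_pos (a := k) (b := 4) (by norm_num),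
    PySem.Int.floordiv_eq_ediv_of_pos (a := k) (b := 100) (by norm_num),
    PySem.Int.floordiv_eq_ediv_of_pos (a := k) (b := 400) (by norm_num),
    PySem.Int.floordiv_eq_ediv_of_pos (a := k - 1) (b := 4) (by norm_num),
    PySem.Int.floordiv_eq_ediv_of_pos (a := k - 1) (b := 100) (by norm_num),
    PySem.Int.floordiv_eq_ediv_of_pos (a := k - 1) (b := 400) (by norm_num)]
  split_ifs with h1 h2 <;> simp_all <;> omega

theorem pvLoop_eq (n : Nat) :
    (PySem.List.pyRange 1970 (1970 + (n : Int)) 1).foldl (fun acc iy => acc + pvNdaysInYear iy) 0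
      = 365 * n + pvL (1969 + n) - 477 := by
  induction n with
  | zero =>
      simp
      decide
  | succ m ih =>
      have h : PySem.List.pyRange 1970 (1970 + ((m : Int) + 1)) 1
          = PySem.List.pyRange 1970 (1970 + (m : Int)) 1 ++ [1970 + (m : Int)] := by
        have := PySem.List.pyRange_one_succ_right (a := 1970) (b := 1970 + (m : Int)) (by omega)
        simpa [add_assoc] using this
      push_cast
      rw [h, List.foldl_append]
      push_cast at ih
      rw [ih, List.foldl_cons, List.foldl_nil, pvNdays_eq_L]
      have : (1970 : Int) + (m : Int) - 1 = 1969 + (m : Int) := by ring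
      rw [this]
      have : (1969 : Int) + ((m : Int) + 1) = 1970 + (m : Int) := by ring
      rw [this]
      ring

theorem yd2seconds_eq (y d : Int) : yd2seconds y d = yd2seconds_alt y d := by
  unfold yd2seconds yd2seconds_alt
  by_cases h : y > 1970
  · obtain ⟨n, rfl⟩ : ∃ n : Nat, y = 1970 + (n : Int) :=
      ⟨(y - 1970).toNat, by omega⟩
    simp only [pvLoop_eq n, if_pos h, pvL]
    have : (1970 : Int) + (n : Int) - 1 = 1969 + (n : Int) := by ring
    rw [this]
    congr 1
    ring
  · simp only [PySem.List.pyRange_one_eq_nil (by omega : y ≤ 1970), List.foldl_nil, if_neg h]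
    have h477 : pvL 1969 = 477 := by decide
    simp only [pvL, PySem.Int.floordiv] at h477
    norm_num
    omega

-- ===== VERDICT (by name: the statement is the Claim_ definition above) =====
theorem yd2seconds_spec : Claim_equal_yd2seconds := by
  intro y d _
  exact yd2seconds_eq y d
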